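-- pv_equiv track=rewrite | github.com/eb9862/PS | 프로그래머스/2/340212. ［PCCP 기출문제］ 2번 ／ 퍼즐 게임 챌린지/［PCCP 기출문제］ 2번 ／ 퍼즐 게임 챌린지.py | find_time_to_solve
-- ===== SOURCE A (Python) =====
-- def find_time_to_solve(diffs: list, times: list, limit: int, level: int) -> int:
--     l = len(diffs)
--     t = 0
--     time_prev = 0
--     for i in range(l):
--         time_cur = times[i]
--         diff = diffs[i]
--         if diff <= level:
--             t += time_cur
--         else:
--             total = (time_prev + time_cur) * (diff - level) + time_cur
--             t += total
--         time_prev = time_cur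
--     return t
-- ===== SOURCE B (Python) =====
-- def find_time_to_solve(diffs: list, times: list, limit: int, level: int) -> int:
--     def seg(lo, hi, prev):
--         # total solve time for puzzles lo..hi-1, given the previous puzzle's time
--         if hi - lo == 0:
--             return 0
--         if hi - lo == 1:
--             d, t = diffs[lo], times[lo]
--             return t if d <= level else (prev + t) * (d - level) + t
--         mid = (lo + hi) // 2
--         return seg(lo, mid, prev) + seg(mid, hi, times[mid - 1])
--     return seg(0, len(diffs), 0)
-- ===== Notes on version B (the rewrite author's own statement) =====
-- stated objective: alternative
-- what changed: B computes the total by divide-and-conquer on index segments: a segment's time depends on earlier puzzles only through the time of the puzzle just before it, so the list is split at the midpoint and the right half is solved with prev = times[mid-1], instead of A's single left-to-right loop carrying an accumulator and previous-time state.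
import Mathlib
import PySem

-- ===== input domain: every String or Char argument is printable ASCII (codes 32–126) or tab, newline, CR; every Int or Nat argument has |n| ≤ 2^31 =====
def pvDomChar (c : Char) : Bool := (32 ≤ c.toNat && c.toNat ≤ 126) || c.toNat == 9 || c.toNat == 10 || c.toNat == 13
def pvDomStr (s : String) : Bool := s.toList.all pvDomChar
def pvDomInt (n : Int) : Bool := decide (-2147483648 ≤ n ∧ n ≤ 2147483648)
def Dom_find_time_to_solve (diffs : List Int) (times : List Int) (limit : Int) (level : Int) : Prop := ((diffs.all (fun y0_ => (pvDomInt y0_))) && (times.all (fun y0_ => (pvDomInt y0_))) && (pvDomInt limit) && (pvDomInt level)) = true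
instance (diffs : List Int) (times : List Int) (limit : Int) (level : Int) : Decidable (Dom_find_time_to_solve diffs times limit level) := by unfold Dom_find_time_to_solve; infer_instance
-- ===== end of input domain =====

-- B replaces A's single left-to-right loop (accumulator + carried previous time) by
-- divide-and-conquer on index segments, splitting at the midpoint and solving the right
-- half with prev = times[mid-1]; same O(n) cost, different algorithmic structure.

-- ===== PORT A =====
-- literal transliteration of A's loop: state (t, time_prev); times[i]/diffs[i] via pyGetD,
-- in range under Pre_ (len diffs ≤ len times).
def find_time_to_solve (diffs : List Int) (times : List Int) (limit : Int) (level : Int) : Int :=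
  let l := diffs.length
  let r := (PySem.List.pyRange 0 (l : Int) 1).foldl
    (fun (s : Int × Int) i =>
      let time_cur := PySem.List.pyGetD times i 0
      let diff := PySem.List.pyGetD diffs i 0
      let t := if diff ≤ level then s.1 + time_cur
               else s.1 + ((s.2 + time_cur) * (diff - level) + time_cur)
      (t, time_cur)) (0, 0)
  r.1

-- ===== PORT B =====
-- literal transliteration of Source B's seg helper: divide and conquer on [lo, hi).
def pvSegB (diffs times : List Int) (level : Int) (lo hi : Nat) (prev : Int) : Int :=
  if _h1 : hi - lo = 0 then 0
  else if _h2 : hi - lo = 1 then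
    (if PySem.List.pyGetD diffs (lo : Int) 0 ≤ level then PySem.List.pyGetD times (lo : Int) 0
     else (prev + PySem.List.pyGetD times (lo : Int) 0) * (PySem.List.pyGetD diffs (lo : Int) 0 - level)
          + PySem.List.pyGetD times (lo : Int) 0)
  else
    pvSegB diffs times level lo ((lo + hi) / 2) prev +
    pvSegB diffs times level ((lo + hi) / 2) hi (PySem.List.pyGetD times ((((lo + hi) / 2 : Nat) : Int) - 1) 0)
termination_by hi - lo
decreasing_by all_goals omega

def find_time_to_solve_alt (diffs : List Int) (times : List Int) (limit : Int) (level : Int) : Int :=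
  pvSegB diffs times level 0 diffs.length 0

-- ===== PRECONDITION & SPEC =====
-- Pre_ excludes exactly the inputs where the Python A raises IndexError: times shorter than diffs.
def Pre_find_time_to_solve (diffs : List Int) (times : List Int) (limit : Int) (level : Int) : Prop :=
  diffs.length ≤ times.length
instance (diffs : List Int) (times : List Int) (limit : Int) (level : Int) : Decidable (Pre_find_time_to_solve diffs times limit level) := by unfold Pre_find_time_to_solve; infer_instance

def pvWitness_find_time_to_solve : List Int × List Int × Int × Int := ([3, 1, 4], [2, 5, 3], 10, 2)

def Spec_find_time_to_solve (diffs : List Int) (times : List Int) (limit : Int) (level : Int) (out : Int) : Prop := out = find_time_to_solve_alt diffs times limit level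
instance (diffs : List Int) (times : List Int) (limit : Int) (level : Int) (out : Int) : Decidable (Spec_find_time_to_solve diffs times limit level out) := by unfold Spec_find_time_to_solve; infer_instance

-- ===== CLAIM =====
def Claim_equal_find_time_to_solve : Prop := ∀ (diffs : List Int) (times : List Int) (limit : Int) (level : Int), Dom_find_time_to_solve diffs times limit level → Pre_find_time_to_solve diffs times limit level → Spec_find_time_to_solve diffs times limit level (find_time_to_solve diffs times limit level)

-- ===== LEMMAS AND PROOFS =====

-- per-puzzle cost given the previous puzzle's time
def pvCost (diffs times : List Int) (level prev : Int) (lo : Nat) : Int :=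
  if PySem.List.pyGetD diffs (lo : Int) 0 ≤ level then PySem.List.pyGetD times (lo : Int) 0
  else (prev + PySem.List.pyGetD times (lo : Int) 0) * (PySem.List.pyGetD diffs (lo : Int) 0 - level)
       + PySem.List.pyGetD times (lo : Int) 0

-- linear reference recursion: time for puzzles lo..hi-1 given previous time prev
def pvLin (diffs times : List Int) (level : Int) (lo hi : Nat) (prev : Int) : Int :=
  if lo < hi then
    pvCost diffs times level prev lo +
    pvLin diffs times level (lo + 1) hi (PySem.List.pyGetD times (lo : Int) 0)
  else 0
termination_by hi - lo
decreasing_by omega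

theorem pvLin_nil (diffs times : List Int) (level : Int) (lo hi : Nat) (prev : Int)
    (h : hi ≤ lo) : pvLin diffs times level lo hi prev = 0 := by
  rw [pvLin, if_neg (by omega)]

theorem pvLin_step (diffs times : List Int) (level : Int) (lo hi : Nat) (prev : Int)
    (h : lo < hi) : pvLin diffs times level lo hi prev
      = pvCost diffs times level prev lo +
        pvLin diffs times level (lo + 1) hi (PySem.List.pyGetD times (lo : Int) 0) := by
  rw [pvLin, if_pos h]

-- A's fold over range(lo, lo+k) equals t + pvLin lo (lo+k) prev.
theorem pv_fold (diffs times : List Int) (level : Int) :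
    ∀ (k lo : Nat) (t prev : Int),
    ((PySem.List.pyRange (lo : Int) ((lo + k : Nat) : Int) 1).foldl
      (fun (s : Int × Int) i =>
        let time_cur := PySem.List.pyGetD times i 0
        let diff := PySem.List.pyGetD diffs i 0
        let t := if diff ≤ level then s.1 + time_cur
                 else s.1 + ((s.2 + time_cur) * (diff - level) + time_cur)
        (t, time_cur)) (t, prev)).1
      = t + pvLin diffs times level lo (lo + k) prev := by
  intro k
  induction k with
  | zero =>
    intro lo t prev
    rw [PySem.List.pyRange_one_eq_nil (by omega)]
    rw [pvLin_nil _ _ _ _ _ _ (by omega)]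
    simp
  | succ m ih =>
    intro lo t prev
    rw [PySem.List.pyRange_one_cons (by push_cast; omega)]
    simp only [List.foldl_cons]
    have h1 : ((lo : Int) + 1) = ((lo + 1 : Nat) : Int) := by push_cast; ring
    have h2 : lo + (m + 1) = (lo + 1) + m := by omega
    have hc : (if PySem.List.pyGetD diffs (lo : Int) 0 ≤ level
                 then t + PySem.List.pyGetD times (lo : Int) 0
                 else t + ((prev + PySem.List.pyGetD times (lo : Int) 0)
                            * (PySem.List.pyGetD diffs (lo : Int) 0 - level)
                            + PySem.List.pyGetD times (lo : Int) 0))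
             = t + pvCost diffs times level prev lo := by
      unfold pvCost; split_ifs <;> ring
    rw [pvLin_step _ _ _ _ _ _ (by omega), h2]
    simp only [h1, hc, ih]
    ring

-- pvLin splits at any interior point, with prev = times[split-1] for the right part.
theorem pv_lin_split (diffs times : List Int) (level : Int) :
    ∀ (k lo hi : Nat) (prev : Int), lo + k ≤ hi → 0 < k →
    pvLin diffs times level lo hi prev
      = pvLin diffs times level lo (lo + k) prev
        + pvLin diffs times level (lo + k) hi (PySem.List.pyGetD times (((lo + k : Nat) : Int) - 1) 0) := by
  intro k
  induction k with
  | zero => intro _ _ _ _ h0; omega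
  | succ m ih =>
    intro lo hi prev hle _
    have hcast : (((lo + (m + 1) : Nat) : Int) - 1) = (((lo + m : Nat) : Int)) := by push_cast; ring
    rcases Nat.eq_zero_or_pos m with hm | hm
    · subst hm
      rw [pvLin_step _ _ _ _ _ _ (by omega : lo < hi)]
      rw [pvLin_step _ _ _ _ _ _ (by omega : lo < lo + (0 + 1))]
      rw [pvLin_nil _ _ _ _ _ _ (by omega : lo + (0 + 1) ≤ lo + 1)]
      rw [hcast]
      norm_num
    · have h1 : lo < hi := by omega
      rw [pvLin_step _ _ _ _ _ _ h1]
      rw [pvLin_step _ _ _ _ _ _ (by omega : lo < lo + (m + 1))]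
      have h2 : (lo + 1) + m = lo + (m + 1) := by omega
      have := ih (lo + 1) hi (PySem.List.pyGetD times (lo : Int) 0) (by omega) hm
      rw [h2] at this
      rw [this]
      ring

-- divide-and-conquer equals the linear recursion.
theorem pv_seg_eq_lin (diffs times : List Int) (level : Int) :
    ∀ (n lo hi : Nat) (prev : Int), hi - lo ≤ n →
    pvSegB diffs times level lo hi prev = pvLin diffs times level lo hi prev := by
  intro n
  induction n with
  | zero =>
    intro lo hi prev h
    rw [pvSegB, dif_pos (by omega : hi - lo = 0), pvLin_nil _ _ _ _ _ _ (by omega)]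
  | succ m ih =>
    intro lo hi prev h
    rw [pvSegB]
    by_cases h0 : hi - lo = 0
    · rw [dif_pos h0, pvLin_nil _ _ _ _ _ _ (by omega)]
    · rw [dif_neg h0]
      by_cases h1 : hi - lo = 1
      · rw [dif_pos h1]
        rw [pvLin_step _ _ _ _ _ _ (by omega : lo < hi)]
        rw [pvLin_nil _ _ _ _ _ _ (by omega : hi ≤ lo + 1)]
        unfold pvCost
        ring
      · rw [dif_neg h1]
        have hmidlo : lo < (lo + hi) / 2 := by omega
        have hmidhi : (lo + hi) / 2 < hi := by omega
        rw [ih lo ((lo + hi) / 2) prev (by omega),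
            ih ((lo + hi) / 2) hi _ (by omega)]
        have hsplit := pv_lin_split diffs times level ((lo + hi) / 2 - lo) lo hi prev
          (by omega) (by omega)
        rw [show lo + ((lo + hi) / 2 - lo) = (lo + hi) / 2 by omega] at hsplit
        rw [hsplit]

-- ===== VERDICT =====
theorem find_time_to_solve_spec : Claim_equal_find_time_to_solve := by
  intro diffs times limit level _hdom _hpre
  unfold Spec_find_time_to_solve find_time_to_solve find_time_to_solve_alt
  have hf := pv_fold diffs times level diffs.length 0 0 0
  simp only [Nat.zero_add, Nat.cast_zero] at hf
  rw [hf, pv_seg_eq_lin diffs times level diffs.length 0 diffs.length 0 (by omega)]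
  ring
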